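-- pv_equiv track=rewrite | github.com/chris-arsenault/advent-of-code-2025 | day3/main.py | best_two_digits
-- ===== SOURCE A (Python) =====
-- def best_two_digits(s: str) -> int:
--     digits = [int(ch) for ch in s.strip()]
--     n = len(digits)
--     if n < 2:
--         return 0
--     suffix_max = [0] * (n + 1)
--     for i in range(n - 1, -1, -1):
--         suffix_max[i] = max(suffix_max[i + 1], digits[i])
--
--     best = -1
--     for i, d in enumerate(digits[:-1]):
--         candidate = 10 * d + suffix_max[i + 1]
--         if candidate > best:
--             best = candidate
--     return best
-- ===== SOURCE B (Python) =====
-- def best_two_digits(s: str) -> int: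
--     digits = [int(ch) for ch in s.strip()]
--     if len(digits) < 2:
--         return 0
--     best = -1
--     max_so_far = digits[0]
--     for d in digits[1:]:
--         candidate = 10 * max_so_far + d
--         if candidate > best:
--             best = candidate
--         if d > max_so_far:
--             max_so_far = d
--     return best
-- ===== Notes on version B (the rewrite author's own statement) =====
-- stated objective: simpler
-- what changed: Replaced the precomputed (n+1)-entry suffix-max table and its backward pass with a single forward pass that keeps a running prefix maximum as the tens digit, dropping the auxiliary array (O(1) extra space).
import Mathlib
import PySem

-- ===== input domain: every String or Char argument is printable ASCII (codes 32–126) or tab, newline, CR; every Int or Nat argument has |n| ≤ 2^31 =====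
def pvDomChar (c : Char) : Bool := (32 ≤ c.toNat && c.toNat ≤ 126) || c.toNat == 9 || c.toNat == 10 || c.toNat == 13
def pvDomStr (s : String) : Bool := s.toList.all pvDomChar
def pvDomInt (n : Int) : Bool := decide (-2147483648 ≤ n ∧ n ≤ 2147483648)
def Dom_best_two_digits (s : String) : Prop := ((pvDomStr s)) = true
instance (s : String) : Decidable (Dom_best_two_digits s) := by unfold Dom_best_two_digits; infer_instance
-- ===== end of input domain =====

-- B replaces A's suffix-max table and backward pass by a single forward pass with a running
-- prefix maximum (same O(n) time, no auxiliary array); equal wherever the stripped input is all digits.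


-- ===== PORT A =====
-- digits = [int(ch) for ch in s.strip()]   (this first line is identical in A and B)
def pvDigits? (s : String) : Option (List Int) :=
  (PySem.Chars.strip s.toList).mapM (fun c => PySem.Int.ofChars? [c])

-- the backward loop:  suffix_max[i] = max(suffix_max[i+1], digits[i]),  suffix_max[n] = 0
def bestTwoSuffixMax : List Int → List Int
  | [] => [0]
  | d :: t => max ((bestTwoSuffixMax t).headD 0) d :: bestTwoSuffixMax t

def best_two_digits (s : String) : Int :=
  match pvDigits? s with
  | none => 0      -- int(ch) raised ValueError; excluded by Pre_
  | some digits =>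
    let n : Int := digits.length
    if n < 2 then 0
    else
      let suffix_max := bestTwoSuffixMax digits
      (PySem.List.enumerate (PySem.List.slice digits none (some (-1)))).foldl
        (fun best p =>
          let candidate := 10 * p.2 + PySem.List.pyGetD suffix_max (p.1 + 1) 0
          if candidate > best then candidate else best) (-1)

-- ===== PORT B =====
-- for d in digits[1:]: candidate = 10*max_so_far + d; update best; update max_so_far
def bestTwoAltLoop : List Int → Int → Int → Int
  | [], best, _ => best
  | d :: t, best, max_so_far =>
      let candidate := 10 * max_so_far + d
      bestTwoAltLoop t (if candidate > best then candidate else best)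
        (if d > max_so_far then d else max_so_far)

def best_two_digits_alt (s : String) : Int :=
  match pvDigits? s with
  | none => 0      -- int(ch) raised ValueError; excluded by Pre_
  | some digits =>
    if (digits.length : Int) < 2 then 0
    else
      match digits with
      | [] => 0    -- unreachable: length ≥ 2
      | d0 :: rest => bestTwoAltLoop rest (-1) d0

-- ===== PRECONDITION & SPEC =====
-- Pre_ excludes exactly the strings whose stripped form contains a non-digit character:
-- there int(ch) raises ValueError in both Pythons.
def Pre_best_two_digits (s : String) : Prop :=
  (PySem.Chars.strip s.toList).all Char.isDigit = true
instance (s : String) : Decidable (Pre_best_two_digits s) := by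
  unfold Pre_best_two_digits; infer_instance

def pvWitness_best_two_digits : String := " 3751 "

def Spec_best_two_digits (s : String) (out : Int) : Prop := out = best_two_digits_alt s
instance (s : String) (out : Int) : Decidable (Spec_best_two_digits s out) := by
  unfold Spec_best_two_digits; infer_instance

-- ===== CLAIM (what is proved, stated in full; the proofs are below) =====
def Claim_equal_best_two_digits : Prop :=
  ∀ (s : String), Dom_best_two_digits s → Pre_best_two_digits s →
    Spec_best_two_digits s (best_two_digits s)

-- ===== LEMMAS AND PROOFS =====

-- value of int(ch) for a digit character
theorem pvOfChars_digit (c : Char) (h : c.isDigit = true) :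
    PySem.Int.ofChars? [c] = some ((c.toNat : Int) - 48) := by
  have hb : 48 ≤ c.toNat ∧ c.toNat ≤ 57 := by
    rw [Char.isDigit] at h
    simp only [Bool.and_eq_true, decide_eq_true_eq] at h
    obtain ⟨h1, h2⟩ := h
    have g1 : ('0'.val : UInt32).toNat ≤ c.val.toNat := UInt32.le_iff_toNat_le.mp h1
    have g2 : c.val.toNat ≤ ('9'.val : UInt32).toNat := UInt32.le_iff_toNat_le.mp h2
    have e0 : ('0'.val : UInt32).toNat = 48 := by decide
    have e9 : ('9'.val : UInt32).toNat = 57 := by decide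
    exact ⟨by rw [← e0]; exact g1, by rw [← e9]; exact g2⟩
  obtain ⟨h1, h2⟩ := hb
  have hofn := Char.ofNat_toNat c
  have hc : c ∈ ['0','1','2','3','4','5','6','7','8','9'] := by
    interval_cases hn : c.toNat <;> rw [← hofn] <;> decide
  fin_cases hc <;> decide

theorem pvParse_digits (cs : List Char) (h : ∀ c ∈ cs, c.isDigit = true) :
    cs.mapM (fun c => PySem.Int.ofChars? [c])
      = some (cs.map fun c => (c.toNat : Int) - 48) := by
  induction cs with
  | nil => rfl
  | cons c t ih =>
    have hc := h c (by simp)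
    have ht := ih (fun x hx => h x (by simp [hx]))
    simp [List.mapM_cons, pvOfChars_digit c hc, ht]

-- running max with floor 0 (the value suffix_max stores)
def pvL0 : List Int → Int
  | [] => 0
  | d :: t => max (pvL0 t) d

-- A's loop in recursive form: at h the candidate is 10*h + (max of the rest, floored at 0)
def pvAF : List Int → Int → Int
  | [], b => b
  | [_], b => b
  | d :: t, b => pvAF t (max b (10 * d + pvL0 t))

theorem pvL0_nonneg (t : List Int) : 0 ≤ pvL0 t := by
  induction t with
  | nil => simp [pvL0]
  | cons d t ih => simp only [pvL0]; omega

theorem pvSM_head (t : List Int) : (bestTwoSuffixMax t).headD 0 = pvL0 t := by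
  induction t with
  | nil => rfl
  | cons d t ih => simp only [bestTwoSuffixMax, List.headD_cons, pvL0]; rw [ih]

theorem pvIf_gt_eq_max (b c : Int) : (if c > b then c else b) = max b c := by
  rw [max_def]; split_ifs <;> omega

theorem pvGetD_cons_succ (x : Int) (xs : List Int) (i : Int) (hi : 0 ≤ i) :
    PySem.List.pyGetD (x :: xs) (i + 1) 0 = PySem.List.pyGetD xs i 0 := by
  obtain ⟨n, rfl⟩ := Int.eq_ofNat_of_zero_le hi
  have : (n : Int) + 1 = ((n + 1 : Nat) : Int) := by push_cast; ring
  rw [this, PySem.List.pyGetD_natCast, PySem.List.pyGetD_natCast]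
  simp

theorem pvShift (a : Int) (l : List Int) :
    ∀ (u : List Int) (k : Int) (b : Int), 0 ≤ k →
    (PySem.List.enumerate u (k + 1)).foldl
        (fun best p => max best (10 * p.2 + PySem.List.pyGetD (a :: l) (p.1 + 1) 0)) b
      = (PySem.List.enumerate u k).foldl
        (fun best p => max best (10 * p.2 + PySem.List.pyGetD l (p.1 + 1) 0)) b := by
  intro u
  induction u with
  | nil => intro k b hk; simp [PySem.List.enumerate_nil]
  | cons y u ih =>
    intro k b hk
    rw [PySem.List.enumerate_cons, PySem.List.enumerate_cons, List.foldl_cons, List.foldl_cons]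
    have h1 : PySem.List.pyGetD (a :: l) (k + 1 + 1) 0 = PySem.List.pyGetD l (k + 1) 0 :=
      pvGetD_cons_succ a l (k + 1) (by omega)
    rw [h1, ih (k + 1) _ (by omega)]

theorem pvFoldAmax (ds : List Int) : ∀ b : Int, ds ≠ [] →
    (PySem.List.enumerate ds.dropLast).foldl
      (fun best p => max best (10 * p.2 + PySem.List.pyGetD (bestTwoSuffixMax ds) (p.1 + 1) 0)) b
    = pvAF ds b := by
  induction ds with
  | nil => intro b hb; exact absurd rfl hb
  | cons h t ih =>
    intro b _
    cases t with
    | nil => simp [PySem.List.enumerate_nil, pvAF]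
    | cons x t' =>
      rw [List.dropLast_cons₂, PySem.List.enumerate_cons, List.foldl_cons]
      have hsm : bestTwoSuffixMax (h :: x :: t')
          = max ((bestTwoSuffixMax (x :: t')).headD 0) h :: bestTwoSuffixMax (x :: t') := rfl
      have hget : PySem.List.pyGetD (bestTwoSuffixMax (h :: x :: t')) ((0 : Int) + 1) 0
          = pvL0 (x :: t') := by
        rw [hsm, pvGetD_cons_succ _ _ 0 le_rfl, PySem.List.pyGetD_zero, ← pvSM_head (x :: t')]
        cases hsm2 : bestTwoSuffixMax (x :: t') <;> rfl
      rw [hget]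
      have hsh := pvShift (max ((bestTwoSuffixMax (x :: t')).headD 0) h)
        (bestTwoSuffixMax (x :: t')) ((x :: t').dropLast) 0
        (max b (10 * h + pvL0 (x :: t'))) le_rfl
      rw [← hsm] at hsh
      rw [hsh, ih _ (by simp)]
      rfl

theorem pvAltLoop_cons (d : Int) (t : List Int) (b m : Int) :
    bestTwoAltLoop (d :: t) b m = bestTwoAltLoop t (max b (10 * m + d)) (max m d) := by
  simp only [bestTwoAltLoop, pvIf_gt_eq_max]

theorem pvAltLoop_max (t : List Int) : ∀ (b c m : Int),
    bestTwoAltLoop t (max b c) m = max b (bestTwoAltLoop t c m) := by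
  induction t with
  | nil => intro b c m; rfl
  | cons d t ih =>
    intro b c m
    rw [pvAltLoop_cons, pvAltLoop_cons, max_assoc, ih]

theorem pvAF_max (ds : List Int) : ∀ (b c : Int),
    pvAF ds (max b c) = max b (pvAF ds c) := by
  induction ds with
  | nil => intro b c; rfl
  | cons d t ih =>
    intro b c
    cases t with
    | nil => rfl
    | cons x t' =>
      simp only [pvAF]
      rw [max_assoc, ih]

theorem pvAF_cons_expand (x : Int) (t : List Int) (ht : t ≠ [])
    (hX : -1 ≤ 10 * x + pvL0 t) :
    pvAF (x :: t) (-1) = max (10 * x + pvL0 t) (pvAF t (-1)) := by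
  cases t with
  | nil => exact absurd rfl ht
  | cons y t' =>
    show pvAF (y :: t') (max (-1) (10 * x + pvL0 (y :: t'))) = _
    rw [max_comm (-1 : Int) _, pvAF_max]

theorem pvMain (t : List Int) : ∀ m : Int, t ≠ [] → 0 ≤ m → (∀ x ∈ t, 0 ≤ x) →
    bestTwoAltLoop t (-1) m = max (10 * m + pvL0 t) (pvAF t (-1)) := by
  induction t with
  | nil => intro m hm _ _; exact absurd rfl hm
  | cons x t' ih =>
    intro m _ hm hnn
    have hx : 0 ≤ x := hnn x (by simp)
    rw [pvAltLoop_cons, max_comm (-1 : Int) _, pvAltLoop_max]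
    cases t' with
    | nil =>
      simp only [bestTwoAltLoop, pvAF, pvL0, max_def]
      split_ifs <;> omega
    | cons y t'' =>
      rw [ih (max m x) (by simp) (by omega) (fun z hz => hnn z (by simp [hz]))]
      have hLyt : 0 ≤ pvL0 (y :: t'') := pvL0_nonneg (y :: t'')
      rw [pvAF_cons_expand x (y :: t'') (by simp) (by omega)]
      have hL0x : pvL0 (x :: y :: t'') = max (pvL0 (y :: t'')) x := rfl
      rw [hL0x]
      simp only [max_def]
      split_ifs <;> omega

-- ===== VERDICT (by name: the statement is the Claim_ definition above) =====
theorem best_two_digits_spec : Claim_equal_best_two_digits := by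
  intro s _ hpre
  unfold Spec_best_two_digits
  unfold Pre_best_two_digits at hpre
  rw [List.all_eq_true] at hpre
  have hparse := pvParse_digits (PySem.Chars.strip s.toList) (fun c hc => hpre c hc)
  have hnn0 : ∀ x ∈ (PySem.Chars.strip s.toList).map (fun c => (c.toNat : Int) - 48), 0 ≤ x := by
    intro x hx
    rw [List.mem_map] at hx
    obtain ⟨c, hc, rfl⟩ := hx
    have h' := hpre c hc
    rw [Char.isDigit] at h'
    simp only [Bool.and_eq_true, decide_eq_true_eq] at h'
    have g1 : ('0'.val : UInt32).toNat ≤ c.val.toNat := UInt32.le_iff_toNat_le.mp h'.1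
    have e0 : ('0'.val : UInt32).toNat = 48 := by decide
    rw [e0] at g1
    have : (48 : Int) ≤ (c.toNat : Int) := by exact_mod_cast g1
    omega
  obtain ⟨ds, hparse, hnn⟩ :
      ∃ ds, (PySem.Chars.strip s.toList).mapM (fun c => PySem.Int.ofChars? [c]) = some ds ∧
        ∀ x ∈ ds, 0 ≤ x := ⟨_, hparse, hnn0⟩
  unfold best_two_digits best_two_digits_alt pvDigits?
  rw [hparse]
  simp only
  by_cases hn : (ds.length : Int) < 2
  · rw [if_pos hn, if_pos hn]
  · rw [if_neg hn, if_neg hn]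
    cases ds with
    | nil => simp at hn
    | cons h t =>
      cases t with
      | nil => simp at hn
      | cons x t' =>
        have hh : 0 ≤ h := hnn h (by simp)
        have hnn' : ∀ z ∈ (x :: t'), 0 ≤ z := fun z hz => hnn z (by simp [hz])
        have hfold :
            (PySem.List.enumerate (PySem.List.slice (h :: x :: t') none (some (-1)))).foldl
              (fun best p =>
                let candidate := 10 * p.2 +
                  PySem.List.pyGetD (bestTwoSuffixMax (h :: x :: t')) (p.1 + 1) 0
                if candidate > best then candidate else best) (-1 : Int)
            = pvAF (h :: x :: t') (-1) := by
          rw [PySem.List.slice_to_neg_one]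
          rw [← pvFoldAmax (h :: x :: t') (-1) (by simp)]
          simp only [pvIf_gt_eq_max]
        rw [hfold]
        show pvAF (h :: x :: t') (-1) = bestTwoAltLoop (x :: t') (-1) h
        rw [pvMain (x :: t') h (by simp) hh hnn']
        have hX : -1 ≤ 10 * h + pvL0 (x :: t') := by
          have := pvL0_nonneg (x :: t'); omega
        rw [pvAF_cons_expand h (x :: t') (by simp) hX]
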